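-- pv_equiv track=rewrite | github.com/TheMoralLowGround/icap-v7-master-11-Feb-2026 | icap-v7-master/backend/utils/assembly_utils.py | check_processing_document_no_upload
-- ===== SOURCE A (Python) =====
-- def check_processing_document_no_upload(final_jsons=None):
--     empty_json_count = 0
--     no_doc_upload_json_count = 0
--
--     for final_json in final_jsons:
--         response_json = (final_json or {}).get("response_json", {})
--
--         if not response_json:
--             empty_json_count += 1
--         elif response_json.get("remarks") == "Processing Document No Upload":
--             no_doc_upload_json_count += 1
--
--     if no_doc_upload_json_count != 0 and len(final_jsons) == (
--         no_doc_upload_json_count + empty_json_count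
--     ):
--         return True
--
--     return False
-- ===== SOURCE B (Python) =====
-- def check_processing_document_no_upload(final_jsons=None):
--     found_no_upload = False
--     for final_json in final_jsons:
--         response_json = (final_json or {}).get("response_json", {})
--         if not response_json:
--             continue
--         elif response_json.get("remarks") == "Processing Document No Upload":
--             found_no_upload = True
--         else:
--             return False
--     return found_no_upload
-- ===== Notes on version B (the rewrite author's own statement) =====
-- stated objective: simpler
-- what changed: Replaces the two counters and the final len-based arithmetic with a single-pass loop that keeps one boolean and returns False immediately on the first non-empty, non-no-upload json.
-- outside the precondition, e.g. on check_processing_document_no_upload(None): A raises TypeError, B raises TypeError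
import Mathlib
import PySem

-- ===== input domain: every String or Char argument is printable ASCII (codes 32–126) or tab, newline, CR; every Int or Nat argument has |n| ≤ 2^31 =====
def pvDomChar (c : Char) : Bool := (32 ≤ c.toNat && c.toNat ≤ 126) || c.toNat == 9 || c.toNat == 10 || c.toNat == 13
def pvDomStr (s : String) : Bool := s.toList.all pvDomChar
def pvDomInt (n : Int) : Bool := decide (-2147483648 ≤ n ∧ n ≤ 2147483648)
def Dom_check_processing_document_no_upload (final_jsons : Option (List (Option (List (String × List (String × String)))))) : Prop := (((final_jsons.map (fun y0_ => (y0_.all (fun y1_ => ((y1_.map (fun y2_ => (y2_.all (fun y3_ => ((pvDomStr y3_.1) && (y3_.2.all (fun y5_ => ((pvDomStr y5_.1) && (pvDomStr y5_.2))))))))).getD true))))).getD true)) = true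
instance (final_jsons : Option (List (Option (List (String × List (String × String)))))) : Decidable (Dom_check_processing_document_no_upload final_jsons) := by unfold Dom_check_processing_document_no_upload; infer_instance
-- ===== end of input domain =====

-- B replaces A's two counters and final len-based arithmetic with a single-pass
-- early-exit loop holding one boolean (objective: simpler).


-- ===== PORT A =====
-- `(final_json or {}).get("response_json", {})`: a `none`/empty dict falls back to {}.
def pvResponseJson (final_json : Option (List (String × List (String × String)))) :
    List (String × String) :=
  (PySem.Dict.mk (final_json.getD [])).getD "response_json" []

-- A's loop body (one step of the for-loop, classifying one final_json)
def pvStepA (p : Int × Int) (final_json : Option (List (String × List (String × String)))) :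
    Int × Int :=
  let response_json := pvResponseJson final_json
  if response_json.isEmpty then (p.1 + 1, p.2)
  else if (PySem.Dict.mk response_json).get? "remarks" = some "Processing Document No Upload" then
    (p.1, p.2 + 1)
  else p

-- literal port of A: count empty and no-upload jsons, then compare with the length
def check_processing_document_no_upload (final_jsons : Option (List (Option (List (String × List (String × String)))))) : Bool :=
  let xs := final_jsons.getD []
  let counts : Int × Int := xs.foldl pvStepA (0, 0)
  decide (counts.2 ≠ 0 ∧ (xs.length : Int) = counts.2 + counts.1)

-- ===== PORT B =====
-- single-pass early-exit loop over the list, carrying one boolean flag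
def pvGoB (found_no_upload : Bool) :
    List (Option (List (String × List (String × String)))) → Bool
  | [] => found_no_upload
  | final_json :: rest =>
    let response_json := pvResponseJson final_json
    if response_json.isEmpty then pvGoB found_no_upload rest
    else if (PySem.Dict.mk response_json).get? "remarks" = some "Processing Document No Upload" then
      pvGoB true rest
    else false

def check_processing_document_no_upload_alt (final_jsons : Option (List (Option (List (String × List (String × String)))))) : Bool :=
  pvGoB false (final_jsons.getD [])

-- ===== PRECONDITION & SPEC =====
-- Pre_ excludes only `None`, on which Python A raises TypeError (iterating None).
def Pre_check_processing_document_no_upload (final_jsons : Option (List (Option (List (String × List (String × String)))))) : Prop :=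
  final_jsons ≠ none
instance (final_jsons : Option (List (Option (List (String × List (String × String)))))) : Decidable (Pre_check_processing_document_no_upload final_jsons) := by unfold Pre_check_processing_document_no_upload; infer_instance

def pvWitness_check_processing_document_no_upload : (Option (List (Option (List (String × List (String × String)))))) :=
  some [none, some [("response_json", [("remarks", "Processing Document No Upload")])]]

def Spec_check_processing_document_no_upload (final_jsons : Option (List (Option (List (String × List (String × String)))))) (out : Bool) : Prop := out = check_processing_document_no_upload_alt final_jsons
instance (final_jsons : Option (List (Option (List (String × List (String × String)))))) (out : Bool) : Decidable (Spec_check_processing_document_no_upload final_jsons out) := by unfold Spec_check_processing_document_no_upload; infer_instance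

-- ===== CLAIM (what is proved, stated in full; the proofs are below) =====
def Claim_equal_check_processing_document_no_upload : Prop := ∀ (final_jsons : Option (List (Option (List (String × List (String × String)))))), Dom_check_processing_document_no_upload final_jsons → Pre_check_processing_document_no_upload final_jsons → Spec_check_processing_document_no_upload final_jsons (check_processing_document_no_upload final_jsons)

-- ===== LEMMAS AND PROOFS =====

lemma stepA_empty (p : Int × Int) (fj : Option (List (String × List (String × String))))
    (h : (pvResponseJson fj).isEmpty = true) : pvStepA p fj = (p.1 + 1, p.2) := by
  simp [pvStepA, h]

lemma stepA_nu (p : Int × Int) (fj : Option (List (String × List (String × String))))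
    (h1 : ¬ (pvResponseJson fj).isEmpty = true)
    (h2 : (PySem.Dict.mk (pvResponseJson fj)).get? "remarks" = some "Processing Document No Upload") :
    pvStepA p fj = (p.1, p.2 + 1) := by
  simp [pvStepA, h1, h2]

lemma stepA_other (p : Int × Int) (fj : Option (List (String × List (String × String))))
    (h1 : ¬ (pvResponseJson fj).isEmpty = true)
    (h2 : ¬ (PySem.Dict.mk (pvResponseJson fj)).get? "remarks" = some "Processing Document No Upload") :
    pvStepA p fj = p := by
  simp [pvStepA, h1, h2]

lemma goB_empty (b : Bool) (fj : Option (List (String × List (String × String))))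
    (rest : List (Option (List (String × List (String × String)))))
    (h : (pvResponseJson fj).isEmpty = true) : pvGoB b (fj :: rest) = pvGoB b rest := by
  simp [pvGoB, h]

lemma goB_nu (b : Bool) (fj : Option (List (String × List (String × String))))
    (rest : List (Option (List (String × List (String × String)))))
    (h1 : ¬ (pvResponseJson fj).isEmpty = true)
    (h2 : (PySem.Dict.mk (pvResponseJson fj)).get? "remarks" = some "Processing Document No Upload") :
    pvGoB b (fj :: rest) = pvGoB true rest := by
  simp [pvGoB, h1, h2]

lemma goB_other (b : Bool) (fj : Option (List (String × List (String × String))))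
    (rest : List (Option (List (String × List (String × String)))))
    (h1 : ¬ (pvResponseJson fj).isEmpty = true)
    (h2 : ¬ (PySem.Dict.mk (pvResponseJson fj)).get? "remarks" = some "Processing Document No Upload") :
    pvGoB b (fj :: rest) = false := by
  simp [pvGoB, h1, h2]

lemma pvFoldA_sum_le (xs : List (Option (List (String × List (String × String)))))
    (e n : Int) :
    (xs.foldl pvStepA (e, n)).1 + (xs.foldl pvStepA (e, n)).2 ≤ e + n + xs.length := by
  induction xs generalizing e n with
  | nil => simp
  | cons fj rest ih =>
    rw [List.foldl_cons, List.length_cons]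
    by_cases h1 : (pvResponseJson fj).isEmpty = true
    · rw [stepA_empty _ _ h1]; have := ih (e + 1) n; push_cast at *; omega
    · by_cases h2 : (PySem.Dict.mk (pvResponseJson fj)).get? "remarks" = some "Processing Document No Upload"
      · rw [stepA_nu _ _ h1 h2]; have := ih e (n + 1); push_cast at *; omega
      · rw [stepA_other _ _ h1 h2]; have := ih e n; push_cast at *; omega

lemma pvKey (xs : List (Option (List (String × List (String × String)))))
    (e n : Int) (hn : 0 ≤ n) :
    decide ((xs.foldl pvStepA (e, n)).2 ≠ 0 ∧
        (xs.length : Int) + e + n = (xs.foldl pvStepA (e, n)).2 + (xs.foldl pvStepA (e, n)).1)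
      = pvGoB (decide (n ≠ 0)) xs := by
  induction xs generalizing e n with
  | nil =>
    simp only [List.foldl_nil, List.length_nil, Nat.cast_zero, pvGoB, decide_eq_decide]
    omega
  | cons fj rest ih =>
    rw [List.foldl_cons, List.length_cons]
    by_cases h1 : (pvResponseJson fj).isEmpty = true
    · rw [stepA_empty _ _ h1, goB_empty _ _ _ h1, ← ih (e + 1) n hn, decide_eq_decide]
      push_cast
      constructor <;> exact fun h => ⟨h.1, by omega⟩
    · by_cases h2 : (PySem.Dict.mk (pvResponseJson fj)).get? "remarks" = some "Processing Document No Upload"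
      · rw [stepA_nu _ _ h1 h2, goB_nu _ _ _ h1 h2]
        have hb : decide ((n : Int) + 1 ≠ 0) = true := by simp; omega
        rw [← hb, ← ih e (n + 1) (by omega), decide_eq_decide]
        push_cast
        constructor <;> exact fun h => ⟨h.1, by omega⟩
      · rw [stepA_other _ _ h1 h2, goB_other _ _ _ h1 h2, decide_eq_false_iff_not]
        have hle := pvFoldA_sum_le rest e n
        rintro ⟨hne, heq⟩
        push_cast at heq hle
        omega

theorem pvMain (xs : List (Option (List (String × List (String × String))))) :
    check_processing_document_no_upload (some xs)
      = check_processing_document_no_upload_alt (some xs) := by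
  unfold check_processing_document_no_upload check_processing_document_no_upload_alt
  simp only [Option.getD_some]
  have h := pvKey xs 0 0 (le_refl 0)
  rw [show (decide ((0:Int) ≠ 0)) = false by decide] at h
  rw [← h, decide_eq_decide]
  constructor <;> exact fun hh => ⟨hh.1, by omega⟩

-- ===== VERDICT (by name: the statement is the Claim_ definition above) =====
theorem check_processing_document_no_upload_spec : Claim_equal_check_processing_document_no_upload := by
  intro final_jsons _ hpre
  unfold Spec_check_processing_document_no_upload
  cases final_jsons with
  | none => exact absurd rfl hpre
  | some xs => exact pvMain xs
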